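-- pv_equiv track=rewrite | github.com/Saniya-22/centralized_contract_mnagement_suite | ingest_python/pipeline.py | murmurhash3_32
-- ===== SOURCE A (Python) =====
-- def murmurhash3_32(data: str) -> int:
--     """Calculates the 32-bit MurmurHash3 value of a string."""
--     data_bytes = data.encode("utf-8")
--     length = len(data_bytes)
--     c1 = 0xCC9E2D51
--     c2 = 0x1B873593
--     h1 = 0
--     nblocks = length // 4
--
--     for i in range(nblocks):
--         k1 = int.from_bytes(data_bytes[i * 4 : (i + 1) * 4], "little")
--         k1 = (k1 * c1) & 0xFFFFFFFF
--         k1 = ((k1 << 15) | (k1 >> 17)) & 0xFFFFFFFF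
--         k1 = (k1 * c2) & 0xFFFFFFFF
--         h1 ^= k1
--         h1 = ((h1 << 13) | (h1 >> 19)) & 0xFFFFFFFF
--         h1 = (h1 * 5 + 0xE6546B64) & 0xFFFFFFFF
--
--     h1 ^= length
--     h1 ^= h1 >> 16
--     h1 = (h1 * 0x85EBCA6B) & 0xFFFFFFFF
--     h1 ^= h1 >> 13
--     h1 = (h1 * 0xC2B2AE35) & 0xFFFFFFFF
--     h1 ^= h1 >> 16
--
--     if h1 & 0x80000000:
--         h1 = -((~h1 + 1) & 0xFFFFFFFF)
--
--     return h1
-- ===== SOURCE B (Python) =====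
-- def murmurhash3_32(data: str) -> int:
--     """32-bit MurmurHash3: single streaming pass over the bytes (no slicing/from_bytes)."""
--     h1 = 0
--     k1 = 0
--     count = 0
--     for byte in data.encode("utf-8"):
--         k1 += byte << (8 * (count % 4))
--         count += 1
--         if count % 4 == 0:
--             k1 = (k1 * 0xCC9E2D51) & 0xFFFFFFFF
--             k1 = ((k1 << 15) | (k1 >> 17)) & 0xFFFFFFFF
--             k1 = (k1 * 0x1B873593) & 0xFFFFFFFF
--             h1 ^= k1
--             h1 = ((h1 << 13) | (h1 >> 19)) & 0xFFFFFFFF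
--             h1 = (h1 * 5 + 0xE6546B64) & 0xFFFFFFFF
--             k1 = 0
--     h1 ^= count
--     h1 ^= h1 >> 16
--     h1 = (h1 * 0x85EBCA6B) & 0xFFFFFFFF
--     h1 ^= h1 >> 13
--     h1 = (h1 * 0xC2B2AE35) & 0xFFFFFFFF
--     h1 ^= h1 >> 16
--     if h1 & 0x80000000:
--         h1 = -((~h1 + 1) & 0xFFFFFFFF)
--     return h1
-- ===== Notes on version B (the rewrite author's own statement) =====
-- stated objective: alternative
-- what changed: Replaces the indexed block loop (range over nblocks, byte-slice + int.from_bytes per block) by a single streaming pass over the bytes that accumulates a little-endian word in k1 with a position counter and mixes whenever four bytes are gathered; same per-word math and finalization.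
import Mathlib
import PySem

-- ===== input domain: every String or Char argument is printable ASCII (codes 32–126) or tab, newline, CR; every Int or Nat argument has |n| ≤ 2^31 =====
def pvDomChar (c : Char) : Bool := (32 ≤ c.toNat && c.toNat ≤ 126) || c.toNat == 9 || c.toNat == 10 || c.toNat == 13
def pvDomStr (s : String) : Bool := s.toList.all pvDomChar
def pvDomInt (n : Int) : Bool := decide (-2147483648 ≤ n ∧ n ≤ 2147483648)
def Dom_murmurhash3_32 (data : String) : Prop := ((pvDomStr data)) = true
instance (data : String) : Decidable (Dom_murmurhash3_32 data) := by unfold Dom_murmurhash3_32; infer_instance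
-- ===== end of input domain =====

-- B rewrites A's indexed block loop (slice + int.from_bytes per block) as one streaming pass
-- over the bytes with a k1 accumulator and byte counter; same mixing math and finalization.
-- (objective: alternative decomposition; no speed claim)

-- ===== PORT A =====
-- int.from_bytes(l, "little")  (exact: little-endian base-256 value of the byte list)
def mh_fromLE (l : List Nat) : Nat := l.foldr (fun b acc => acc * 256 + b) 0

-- shared finalization (identical code at the end of both Pythons); on the final branch,
-- Python's -((~h1 + 1) & 0xFFFFFFFF) = -((-h1) mod 2^32) with floor-mod — exact.
def mh_final (h : Nat) (length : Nat) : Int :=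
  let h1 := h ^^^ length
  let h1 := h1 ^^^ (h1 >>> 16)
  let h1 := (h1 * 0x85EBCA6B) % 4294967296
  let h1 := h1 ^^^ (h1 >>> 13)
  let h1 := (h1 * 0xC2B2AE35) % 4294967296
  let h1 := h1 ^^^ (h1 >>> 16)
  if h1 &&& 0x80000000 ≠ 0 then -(PySem.Int.mod (-(h1 : Int)) 4294967296) else (h1 : Int)

-- data.encode("utf-8") on this task's ASCII domain = one byte per char, the char code;
-- range(nblocks) with nblocks ≥ 0 = List.range; the slice [i*4:(i+1)*4] = take 4 (drop (i*4)).
def murmurhash3_32 (data : String) : Int :=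
  let dataBytes : List Nat := data.toList.map Char.toNat
  let length := dataBytes.length
  let nblocks := length / 4
  let h1 := (List.range nblocks).foldl (fun h1 i =>
    let k1 := mh_fromLE ((dataBytes.drop (i * 4)).take 4)
    let k1 := (k1 * 0xCC9E2D51) % 4294967296
    let k1 := ((k1 <<< 15) ||| (k1 >>> 17)) % 4294967296
    let k1 := (k1 * 0x1B873593) % 4294967296
    let h1 := h1 ^^^ k1
    let h1 := ((h1 <<< 13) ||| (h1 >>> 19)) % 4294967296
    (h1 * 5 + 0xE6546B64) % 4294967296) 0
  mh_final h1 length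

-- ===== PORT B =====
-- one step of B's streaming loop: state (h1, k1, count)
def mh_step (st : Nat × Nat × Nat) (b : Nat) : Nat × Nat × Nat :=
  let h1 := st.1
  let k1 := st.2.1 + (b <<< (8 * (st.2.2 % 4)))
  let count := st.2.2 + 1
  if count % 4 = 0 then
    let k1 := (k1 * 0xCC9E2D51) % 4294967296
    let k1 := ((k1 <<< 15) ||| (k1 >>> 17)) % 4294967296
    let k1 := (k1 * 0x1B873593) % 4294967296
    let h1 := h1 ^^^ k1
    let h1 := ((h1 <<< 13) ||| (h1 >>> 19)) % 4294967296
    ((h1 * 5 + 0xE6546B64) % 4294967296, 0, count)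
  else (h1, k1, count)

def murmurhash3_32_alt (data : String) : Int :=
  let st := (data.toList.map Char.toNat).foldl mh_step (0, 0, 0)
  mh_final st.1 st.2.2

-- ===== PRECONDITION & SPEC =====
def Spec_murmurhash3_32 (data : String) (out : Int) : Prop := out = murmurhash3_32_alt data
instance (data : String) (out : Int) : Decidable (Spec_murmurhash3_32 data out) := by unfold Spec_murmurhash3_32; infer_instance

-- ===== CLAIM (what is proved, stated in full; the proofs are below) =====
def Claim_equal_murmurhash3_32 : Prop := ∀ (data : String), Dom_murmurhash3_32 data → Spec_murmurhash3_32 data (murmurhash3_32 data)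

-- ===== LEMMAS AND PROOFS =====

-- the shared per-word scramble+mix, as a named function (definitionally both loops' body)
def mh_mix (h k : Nat) : Nat :=
  let k1 := (k * 0xCC9E2D51) % 4294967296
  let k1 := ((k1 <<< 15) ||| (k1 >>> 17)) % 4294967296
  let k1 := (k1 * 0x1B873593) % 4294967296
  let h1 := h ^^^ k1
  let h1 := ((h1 <<< 13) ||| (h1 >>> 19)) % 4294967296
  (h1 * 5 + 0xE6546B64) % 4294967296

-- reference chunked recursion both loops are proved equal to (f kept abstract)
def chunk4 (f : Nat → Nat → Nat) (h : Nat) : List Nat → Nat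
  | b0 :: b1 :: b2 :: b3 :: rest => chunk4 f (f h (mh_fromLE [b0, b1, b2, b3])) rest
  | _ => h

theorem chunk4_cons (f : Nat → Nat → Nat) (h b0 b1 b2 b3 : Nat) (rest : List Nat) :
    chunk4 f h (b0 :: b1 :: b2 :: b3 :: rest) =
      chunk4 f (f h (mh_fromLE [b0, b1, b2, b3])) rest := rfl
theorem chunk4_nil (f : Nat → Nat → Nat) (h : Nat) : chunk4 f h [] = h := rfl
theorem chunk4_one (f : Nat → Nat → Nat) (h b0 : Nat) : chunk4 f h [b0] = h := rfl
theorem chunk4_two (f : Nat → Nat → Nat) (h b0 b1 : Nat) : chunk4 f h [b0, b1] = h := rfl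
theorem chunk4_three (f : Nat → Nat → Nat) (h b0 b1 b2 : Nat) :
    chunk4 f h [b0, b1, b2] = h := rfl

-- A's indexed loop, for an abstract mixer
theorem foldl_chunk4 (f : Nat → Nat → Nat) (bs : List Nat) (h : Nat) :
    (List.range (bs.length / 4)).foldl
      (fun h1 i => f h1 (mh_fromLE ((bs.drop (i * 4)).take 4))) h = chunk4 f h bs := by
  generalize hn : bs.length = n
  induction n using Nat.strong_induction_on generalizing bs h with
  | _ n ih =>
    rcases bs with _ | ⟨b0, _ | ⟨b1, _ | ⟨b2, _ | ⟨b3, rest⟩⟩⟩⟩ <;> subst hn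
    · rw [chunk4_nil]; simp
    · rw [chunk4_one]; simp
    · rw [chunk4_two]; simp
    · rw [chunk4_three]; simp
    · have hlen : (b0 :: b1 :: b2 :: b3 :: rest).length / 4 = rest.length / 4 + 1 := by
        simp only [List.length_cons]; omega
      rw [hlen, List.range_succ_eq_map, List.foldl_cons, List.foldl_map, chunk4_cons]
      have hstart : mh_fromLE (((b0 :: b1 :: b2 :: b3 :: rest).drop (0 * 4)).take 4) =
          mh_fromLE [b0, b1, b2, b3] := by norm_num
      rw [hstart]
      have hbody : (fun (h1 i : Nat) =>
            f h1 (mh_fromLE (((b0 :: b1 :: b2 :: b3 :: rest).drop (Nat.succ i * 4)).take 4))) =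
          (fun (h1 i : Nat) => f h1 (mh_fromLE ((rest.drop (i * 4)).take 4))) := by
        funext h1 i
        have h4 : Nat.succ i * 4 = 4 + i * 4 := by omega
        rw [h4, ← List.drop_drop]
        rfl
      rw [hbody]
      exact ih rest.length (by simp only [List.length_cons]; omega) rest _ rfl

-- the port A loop body is mh_mix applied to the little-endian word
theorem mh_A_loop (bs : List Nat) (h : Nat) :
    (List.range (bs.length / 4)).foldl (fun h1 i =>
      let k1 := mh_fromLE ((bs.drop (i * 4)).take 4)
      let k1 := (k1 * 0xCC9E2D51) % 4294967296
      let k1 := ((k1 <<< 15) ||| (k1 >>> 17)) % 4294967296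
      let k1 := (k1 * 0x1B873593) % 4294967296
      let h1 := h1 ^^^ k1
      let h1 := ((h1 <<< 13) ||| (h1 >>> 19)) % 4294967296
      (h1 * 5 + 0xE6546B64) % 4294967296) h = chunk4 mh_mix h bs :=
  foldl_chunk4 mh_mix bs h

theorem mh_step_skip (h k c b : Nat) (hne : ¬ (c + 1) % 4 = 0) :
    mh_step (h, k, c) b = (h, k + (b <<< (8 * (c % 4))), c + 1) := by
  simp only [mh_step]; rw [if_neg hne]

theorem mh_step_mix (h k c b : Nat) (he : (c + 1) % 4 = 0) :
    mh_step (h, k, c) b = (mh_mix h (k + (b <<< (8 * (c % 4)))), 0, c + 1) := by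
  simp only [mh_step, mh_mix]; rw [if_pos he]

theorem mh_B_loop (bs : List Nat) (h c : Nat) (hc : c % 4 = 0) :
    (bs.foldl mh_step (h, 0, c)).1 = chunk4 mh_mix h bs ∧
      (bs.foldl mh_step (h, 0, c)).2.2 = c + bs.length := by
  generalize hn : bs.length = n
  induction n using Nat.strong_induction_on generalizing bs h c with
  | _ n ih =>
    rcases bs with _ | ⟨b0, _ | ⟨b1, _ | ⟨b2, _ | ⟨b3, rest⟩⟩⟩⟩ <;> subst hn
    · rw [chunk4_nil]; simp
    · rw [chunk4_one, List.foldl_cons, mh_step_skip _ _ _ _ (by omega)]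
      simp
    · rw [chunk4_two, List.foldl_cons, mh_step_skip _ _ _ _ (by omega),
        List.foldl_cons, mh_step_skip _ _ _ _ (by omega)]
      simp
    · rw [chunk4_three, List.foldl_cons, mh_step_skip _ _ _ _ (by omega),
        List.foldl_cons, mh_step_skip _ _ _ _ (by omega),
        List.foldl_cons, mh_step_skip _ _ _ _ (by omega)]
      simp
    · rw [chunk4_cons, List.foldl_cons, mh_step_skip _ _ _ _ (by omega),
        List.foldl_cons, mh_step_skip _ _ _ _ (by omega),
        List.foldl_cons, mh_step_skip _ _ _ _ (by omega),
        List.foldl_cons, mh_step_mix _ _ _ _ (by omega)]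
      have m1 : (c + 1) % 4 = 1 := by omega
      have m2 : (c + 1 + 1) % 4 = 2 := by omega
      have m3 : (c + 1 + 1 + 1) % 4 = 3 := by omega
      rw [hc, m1, m2, m3]
      have hK : 0 + b0 <<< (8 * 0) + b1 <<< (8 * 1) + b2 <<< (8 * 2) + b3 <<< (8 * 3) =
          mh_fromLE [b0, b1, b2, b3] := by
        simp [mh_fromLE, Nat.shiftLeft_eq]
        ring
      rw [hK]
      have hrec := ih rest.length (by simp only [List.length_cons]; omega) rest
        (mh_mix h (mh_fromLE [b0, b1, b2, b3])) (c + 1 + 1 + 1 + 1) (by omega) rfl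
      refine ⟨hrec.1, ?_⟩
      rw [hrec.2]
      simp only [List.length_cons]
      omega

-- ===== VERDICT (by name: the statement is the Claim_ definition above) =====
theorem murmurhash3_32_spec : Claim_equal_murmurhash3_32 := by
  intro data _
  show _ = _
  unfold murmurhash3_32 murmurhash3_32_alt
  simp only [mh_A_loop, (mh_B_loop _ 0 0 rfl).1, (mh_B_loop _ 0 0 rfl).2]
  simp
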